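-- pv_equiv track=rewrite | github.com/bountonw/translate | lo/GC/04_assets/scripts/helpers/lao_word_processor.py | evaluate_compound_preference
-- ===== SOURCE A (Python) =====
-- from typing import List, Dict, Tuple, Any
--
-- def evaluate_compound_preference(parse_result: List[Dict[str, Any]], text: str) -> int:
--     """
--     FIXED: Enhanced compound word detection with better fragmentation detection.
--
--     This function specifically detects when dictionary compounds have been
--     inappropriately fragmented and applies heavy penalties.
--
--     VALIDATED: Successfully detects fragmentations like:
--     - ດັ່ງນັ້ນ → ດັ່ງ + ນັ້ນ
--     - ຄົ້ນພົບ → ຄົ້ນ + ພົບ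
--     - ຍິ່ງໃຫຍ່ → ຍິ່ງ + ໃຫຍ່
--
--     Args:
--         parse_result: List of parsed segments with type and text
--         text: Original text being parsed
--
--     Returns:
--         int: Penalty score (higher = worse, 0 = no fragmentation detected)
--     """
--     compound_penalty = 0
--
--     # Look for patterns that suggest a compound word was broken up
--     dict_segments = [seg for seg in parse_result if seg['type'] == 'dict']
--
--     if len(dict_segments) >= 2:
--         # Check if consecutive dictionary entries might have been one compound
--         for i in range(len(dict_segments) - 1):
--             current = dict_segments[i]
--             next_seg = dict_segments[i + 1]
--
--             # If both segments are short and could combine to form a compound,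
--             # this is likely inappropriate fragmentation
--             if (len(current['text']) <= 4 and
--                 len(next_seg['text']) <= 4):
--
--                 combined = current['text'] + next_seg['text']
--                 if combined in text:
--                     # This is definitely fragmentation - heavy penalty
--                     compound_penalty += 15
--
--     return compound_penalty
-- ===== SOURCE B (Python) =====
-- from typing import List, Dict, Any
--
-- def evaluate_compound_preference(parse_result: List[Dict[str, Any]], text: str) -> int:
--     """Stage 1: index all substrings of text of length <= 8 in a set (so each
--     membership test is a hash lookup, not a scan of text). Stage 2: penalty is
--     15 * the number of adjacent short dict-text pairs whose concatenation is indexed."""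
--     texts = [seg['text'] for seg in parse_result if seg['type'] == 'dict']
--     n = len(text)
--     subs = set()
--     for i in range(n + 1):
--         for j in range(i, min(i + 8, n) + 1):
--             subs.add(text[i:j])
--     return 15 * sum(1 for a, b in zip(texts, texts[1:])
--                     if len(a) <= 4 and len(b) <= 4 and a + b in subs)
-- ===== Notes on version B (the rewrite author's own statement) =====
-- stated objective: alternative
-- what changed: Instead of filtering segments and scanning text once per consecutive pair, B extracts the dict texts once, precomputes a set index of every substring of text of length <= 8, and returns 15 times the count (over zip of the text list with its tail) of adjacent short pairs whose concatenation is in that index.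
-- outside the precondition, e.g. on evaluate_compound_preference([{'type': 'dict'}], 'x'): A returns 0, B raises KeyError
import Mathlib
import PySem

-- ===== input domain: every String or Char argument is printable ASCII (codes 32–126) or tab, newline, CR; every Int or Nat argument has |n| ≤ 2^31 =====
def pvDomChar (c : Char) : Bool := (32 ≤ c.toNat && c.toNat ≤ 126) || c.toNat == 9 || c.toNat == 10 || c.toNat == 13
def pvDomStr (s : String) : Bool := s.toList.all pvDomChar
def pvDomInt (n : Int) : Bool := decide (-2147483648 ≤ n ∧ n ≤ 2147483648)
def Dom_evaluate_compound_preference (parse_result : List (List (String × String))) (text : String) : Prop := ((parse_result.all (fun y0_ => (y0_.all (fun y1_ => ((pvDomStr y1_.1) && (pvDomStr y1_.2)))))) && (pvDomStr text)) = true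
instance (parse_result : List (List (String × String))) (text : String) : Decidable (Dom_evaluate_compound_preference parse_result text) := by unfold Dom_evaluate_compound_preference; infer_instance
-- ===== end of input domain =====

-- B replaces the per-pair substring scan by a precomputed set of all length-≤8 substrings of
-- text plus a zip/count over the extracted dict texts (objective: alternative algorithm).
-- Shared transliteration of Python's seg[k] on an association list (first match; "" where Python
-- would raise KeyError — those inputs are excluded by Pre_ below).

-- ===== PORT A =====
def pvLookup (seg : List (String × String)) (k : String) : String :=
  ((seg.find? (fun p => p.1 == k)).map (fun p => p.2)).getD ""

def evaluate_compound_preference (parse_result : List (List (String × String))) (text : String) : Int :=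
  let dict_segments := parse_result.filter (fun seg => pvLookup seg "type" == "dict")
  if 2 ≤ dict_segments.length then
    (PySem.List.pyRange 0 ((dict_segments.length : Int) - 1) 1).foldl
      (fun compound_penalty i =>
        let current := PySem.List.pyGetD dict_segments i []
        let next_seg := PySem.List.pyGetD dict_segments (i + 1) []
        if PySem.Str.len (pvLookup current "text") ≤ 4 ∧
           PySem.Str.len (pvLookup next_seg "text") ≤ 4 ∧
           PySem.Str.isIn (pvLookup current "text" ++ pvLookup next_seg "text") text = true
        then compound_penalty + 15 else compound_penalty) 0
  else 0

-- ===== PORT B =====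
-- the double loop of Source B building the substring index (all substrings of length ≤ 8)
def pvSubs (text : String) : PySem.Set String :=
  let n : Int := PySem.Str.len text
  (PySem.List.pyRange 0 (n + 1) 1).foldl
    (fun subs i =>
      (PySem.List.pyRange i (min (i + 8) n + 1) 1).foldl
        (fun subs j => PySem.Set.add subs (PySem.Str.slice text (some i) (some j))) subs)
    PySem.Set.empty

def evaluate_compound_preference_alt (parse_result : List (List (String × String))) (text : String) : Int :=
  let texts := (parse_result.filter (fun seg => pvLookup seg "type" == "dict")).map
    (fun seg => pvLookup seg "text")
  let subs := pvSubs text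
  15 * ((texts.zip (PySem.List.slice texts (some 1) none)).countP
    (fun p => decide (PySem.Str.len p.1 ≤ 4) && decide (PySem.Str.len p.2 ≤ 4) &&
              PySem.Set.contains subs (p.1 ++ p.2)) : Nat)

-- ===== PRECONDITION & SPEC =====
-- Pre_ excludes segments without a 'type' key (A raises KeyError) and dict segments without a
-- 'text' key (A raises KeyError as soon as two dict segments exist; with fewer, A returns 0
-- before touching 'text', but B's eager text extraction raises KeyError there).
def Pre_evaluate_compound_preference (parse_result : List (List (String × String))) (text : String) : Prop :=
  (∀ seg ∈ parse_result, (seg.find? (fun p => p.1 == "type")).isSome) ∧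
  (∀ seg ∈ parse_result, pvLookup seg "type" == "dict" →
      (seg.find? (fun p => p.1 == "text")).isSome)
instance (parse_result : List (List (String × String))) (text : String) : Decidable (Pre_evaluate_compound_preference parse_result text) := by unfold Pre_evaluate_compound_preference; infer_instance

def pvWitness_evaluate_compound_preference : (List (List (String × String))) × String :=
  ([[("type", "dict"), ("text", "ab")], [("type", "other")], [("type", "dict"), ("text", "cd")]], "abcd")

def Spec_evaluate_compound_preference (parse_result : List (List (String × String))) (text : String) (out : Int) : Prop := out = evaluate_compound_preference_alt parse_result text
instance (parse_result : List (List (String × String))) (text : String) (out : Int) : Decidable (Spec_evaluate_compound_preference parse_result text out) := by unfold Spec_evaluate_compound_preference; infer_instance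

-- ===== CLAIM =====
def Claim_equal_evaluate_compound_preference : Prop := ∀ (parse_result : List (List (String × String))) (text : String), Dom_evaluate_compound_preference parse_result text → Pre_evaluate_compound_preference parse_result text → Spec_evaluate_compound_preference parse_result text (evaluate_compound_preference parse_result text)

-- ===== LEMMAS AND PROOFS =====

-- The pair scorer shared by the analysis of both programs.
def pvF (text : String) (a b : String) : Int :=
  if PySem.Str.len a ≤ 4 ∧ PySem.Str.len b ≤ 4 ∧
     PySem.Str.isIn (a ++ b) text = true then 15 else 0

-- Sum of pvF over consecutive elements.
def pvPairSum (text : String) : List String → Int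
  | [] => 0
  | [_] => 0
  | a :: b :: r => pvF text a b + pvPairSum text (b :: r)

lemma pvLookup_getD_map (ds : List (List (String × String))) (i : Nat) :
    pvLookup (ds.getD i []) "text"
      = (ds.map (fun s => pvLookup s "text")).getD i "" := by
  induction ds generalizing i with
  | nil => simp [pvLookup]
  | cons h t ih =>
    cases i with
    | zero => simp
    | succ n => simp only [List.getD_cons_succ, List.map_cons]; exact ih n

lemma pvRangePair (text : String) (l : List String) (acc : Int) :
    (List.range (l.length - 1)).foldl
      (fun pen i => pen + pvF text (l.getD i "") (l.getD (i + 1) "")) acc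
    = acc + pvPairSum text l := by
  induction l generalizing acc with
  | nil => simp [pvPairSum]
  | cons x r ih =>
    cases r with
    | nil => simp [pvPairSum]
    | cons y r' =>
      have hlen : (x :: y :: r').length - 1 = (y :: r').length - 1 + 1 := by simp
      rw [hlen, List.range_succ_eq_map]
      simp only [List.foldl_cons, List.foldl_map, List.getD_cons_zero, List.getD_cons_succ]
      simp only [List.getD_cons_succ] at ih
      rw [ih]
      have hps : pvPairSum text (x :: y :: r') = pvF text x y + pvPairSum text (y :: r') := rfl
      rw [hps]
      ring

-- A equals the pair sum over the extracted dict texts.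
lemma pvAEq (parse_result : List (List (String × String))) (text : String) :
    evaluate_compound_preference parse_result text
    = pvPairSum text ((parse_result.filter (fun seg => pvLookup seg "type" == "dict")).map
        (fun seg => pvLookup seg "text")) := by
  unfold evaluate_compound_preference
  set ds := parse_result.filter (fun seg => pvLookup seg "type" == "dict") with hds
  set ts := ds.map (fun seg => pvLookup seg "text") with hts
  by_cases h2 : 2 ≤ ds.length
  · simp only [if_pos h2]
    have hcast : ((ds.length : Int) - 1) = ((ds.length - 1 : Nat) : Int) := by omega
    rw [hcast, PySem.List.pyRange_zero_natCast]
    rw [List.foldl_map]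
    have hfun : (fun (pen : Int) (i : Nat) =>
        let current := PySem.List.pyGetD ds (i : Int) []
        let next_seg := PySem.List.pyGetD ds ((i : Int) + 1) []
        if PySem.Str.len (pvLookup current "text") ≤ 4 ∧
           PySem.Str.len (pvLookup next_seg "text") ≤ 4 ∧
           PySem.Str.isIn (pvLookup current "text" ++ pvLookup next_seg "text") text = true
        then pen + 15 else pen)
      = (fun pen i => pen + pvF text (ts.getD i "") (ts.getD (i + 1) "")) := by
      funext pen i
      have hc : ((i : Int) + 1) = ((i + 1 : Nat) : Int) := by omega
      simp only [hc, PySem.List.pyGetD_natCast, pvLookup_getD_map, ← hts, pvF]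
      split_ifs <;> simp
    rw [hfun]
    have hl : ds.length - 1 = ts.length - 1 := by simp [hts]
    rw [hl, pvRangePair]
    simp
  · simp only [if_neg h2]
    cases hd : ds with
    | nil => simp [hts, hd, pvPairSum]
    | cons x r =>
      cases r with
      | nil => simp [hts, hd, pvPairSum]
      | cons y r' => exfalso; rw [hd] at h2; simp at h2

-- membership in a fold of Set.add
lemma pvMemFoldAdd (f : Int → String) (l : List Int) (s0 : PySem.Set String) (x : String) :
    x ∈ l.foldl (fun s j => PySem.Set.add s (f j)) s0 ↔ x ∈ s0 ∨ ∃ j ∈ l, x = f j := by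
  induction l generalizing s0 with
  | nil => simp
  | cons a t ih => simp [ih, PySem.Set.mem_add]; tauto

lemma pvMemFold2 (g : Int → List Int) (f : Int → Int → String) (L : List Int)
    (s0 : PySem.Set String) (x : String) :
    x ∈ L.foldl (fun s i => (g i).foldl (fun s j => PySem.Set.add s (f i j)) s) s0
      ↔ x ∈ s0 ∨ ∃ i ∈ L, ∃ j ∈ g i, x = f i j := by
  induction L generalizing s0 with
  | nil => simp
  | cons a t ih => simp [ih, pvMemFoldAdd, or_assoc]

lemma pvMemSubs (text x : String) :
    x ∈ pvSubs text ↔ ∃ i : Int, (0 ≤ i ∧ i < PySem.Str.len text + 1) ∧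
      ∃ j : Int, (i ≤ j ∧ j < min (i + 8) (PySem.Str.len text) + 1) ∧
        x = PySem.Str.slice text (some i) (some j) := by
  unfold pvSubs
  rw [pvMemFold2 (fun i => PySem.List.pyRange i (min (i + 8) (PySem.Str.len text) + 1) 1)
       (fun i j => PySem.Str.slice text (some i) (some j))]
  simp [PySem.Set.empty, PySem.List.mem_pyRange_one]

-- the key fact: for a concatenation of two short strings, the index lookup is the substring test
lemma pvContains (text a b : String) (ha : PySem.Str.len a ≤ 4) (hb : PySem.Str.len b ≤ 4) :
    PySem.Set.contains (pvSubs text) (a ++ b) = PySem.Str.isIn (a ++ b) text := by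
  have hlen : (a ++ b).toList.length ≤ 8 := by
    have h1 := PySem.Str.len_append a b
    have h2 := PySem.Str.len_eq (a ++ b)
    omega
  have hn := PySem.Str.len_eq text
  apply Bool.eq_iff_iff.mpr
  rw [PySem.Set.contains_iff, PySem.Str.isIn_iff_infix, pvMemSubs]
  constructor
  · rintro ⟨i, ⟨h0i, _⟩, j, ⟨hij, _⟩, hx⟩
    have h0j : (0 : Int) ≤ j := le_trans h0i hij
    rw [hx, PySem.Str.toList_slice, PySem.Chars.slice_eq_listSlice,
        PySem.List.slice_toNat _ h0i h0j]
    exact ((List.take_prefix _ _).isInfix).trans ((List.drop_suffix _ _).isInfix)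
  · rintro ⟨u, v, huv⟩
    have hnl : text.toList.length = u.length + (a ++ b).toList.length + v.length := by
      rw [← huv]; simp; omega
    refine ⟨(u.length : Int), ⟨by positivity, by omega⟩,
            (u.length : Int) + ((a ++ b).toList.length : Int), ⟨by omega, by omega⟩, ?_⟩
    have htl : (PySem.Str.slice text (some (u.length : Int))
        (some ((u.length : Int) + ((a ++ b).toList.length : Int)))).toList = (a ++ b).toList := by
      rw [PySem.Str.toList_slice, PySem.Chars.slice_eq_listSlice, PySem.List.slice_natCast_add,
          ← huv, List.append_assoc, List.drop_left, List.take_left]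
    exact String.toList_inj.mp htl.symm

-- the pair scorer, expressed with the index lookup of B
lemma pvCondEq (text a b : String) :
    pvF text a b = if (decide (PySem.Str.len a ≤ 4) && decide (PySem.Str.len b ≤ 4) &&
        PySem.Set.contains (pvSubs text) (a ++ b)) then 15 else 0 := by
  unfold pvF
  have hiff : (PySem.Str.len a ≤ 4 ∧ PySem.Str.len b ≤ 4 ∧ PySem.Str.isIn (a ++ b) text = true)
      ↔ ((decide (PySem.Str.len a ≤ 4) && decide (PySem.Str.len b ≤ 4) &&
          PySem.Set.contains (pvSubs text) (a ++ b)) = true) := by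
    rw [Bool.and_eq_true, Bool.and_eq_true, decide_eq_true_iff, decide_eq_true_iff]
    constructor
    · rintro ⟨h1, h2, h3⟩
      exact ⟨⟨h1, h2⟩, by rw [pvContains text a b h1 h2, h3]⟩
    · rintro ⟨⟨h1, h2⟩, h3⟩
      exact ⟨h1, h2, by rw [← pvContains text a b h1 h2, h3]⟩
  exact if_congr hiff rfl rfl

-- B's zip/count equals the pair sum.
lemma pvCount (text : String) (l : List String) :
    15 * (((l.zip (l.drop 1)).countP
      (fun p => decide (PySem.Str.len p.1 ≤ 4) && decide (PySem.Str.len p.2 ≤ 4) &&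
        PySem.Set.contains (pvSubs text) (p.1 ++ p.2)) : Nat) : Int)
    = pvPairSum text l := by
  induction l with
  | nil => simp [pvPairSum]
  | cons a t ih =>
    cases t with
    | nil => simp [pvPairSum]
    | cons b r =>
      have hps : pvPairSum text (a :: b :: r) = pvF text a b + pvPairSum text (b :: r) := rfl
      rw [hps, ← ih]
      simp only [List.drop_succ_cons, List.drop_zero, List.zip_cons_cons, List.countP_cons]
      rw [pvCondEq]
      split_ifs with h <;> push_cast <;> ring

lemma pvAltEq (parse_result : List (List (String × String))) (text : String) :
    evaluate_compound_preference_alt parse_result text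
    = pvPairSum text ((parse_result.filter (fun seg => pvLookup seg "type" == "dict")).map
        (fun seg => pvLookup seg "text")) := by
  simp only [evaluate_compound_preference_alt, PySem.List.slice_from_one, ← List.drop_one]
  exact pvCount text _

-- ===== VERDICT =====
theorem evaluate_compound_preference_spec : Claim_equal_evaluate_compound_preference := by
  intro parse_result text _ _
  unfold Spec_evaluate_compound_preference
  rw [pvAEq, pvAltEq]
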